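-- pv_equiv track=rewrite | github.com/MrBrantCode/unitest_baseline | mut_generate/mist_train_cf/cf_6259/solution.py | replace_html_entities
-- ===== SOURCE A (Python) =====
-- def replace_html_entities(string):
--     html_entities = {
--         34: '&quot;',
--         38: '&amp;',
--         60: '&lt;',
--         62: '&gt;'
--     }
--     result = ""
--     for char in string:
--         ascii_value = ord(char)
--         if ascii_value in html_entities:
--             result += html_entities[ascii_value]
--         else:
--             result += char
--     return result[:2000]
-- ===== SOURCE B (Python) =====
-- def replace_html_entities(string):
--     # '&' must be replaced first so entities inserted later are not re-encoded
--     result = (string.replace('&', '&amp;')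
--                     .replace('"', '&quot;')
--                     .replace('<', '&lt;')
--                     .replace('>', '&gt;'))
--     return result[:2000]
-- ===== Notes on version B (the rewrite author's own statement) =====
-- stated objective: idiomatic
-- what changed: Replaces the explicit per-character loop with a dict lookup by four chained str.replace calls ('&' first so inserted entities are not re-encoded), then truncates to 2000; the C-level replace avoids Python-level per-char string concatenation.
import Mathlib
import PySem

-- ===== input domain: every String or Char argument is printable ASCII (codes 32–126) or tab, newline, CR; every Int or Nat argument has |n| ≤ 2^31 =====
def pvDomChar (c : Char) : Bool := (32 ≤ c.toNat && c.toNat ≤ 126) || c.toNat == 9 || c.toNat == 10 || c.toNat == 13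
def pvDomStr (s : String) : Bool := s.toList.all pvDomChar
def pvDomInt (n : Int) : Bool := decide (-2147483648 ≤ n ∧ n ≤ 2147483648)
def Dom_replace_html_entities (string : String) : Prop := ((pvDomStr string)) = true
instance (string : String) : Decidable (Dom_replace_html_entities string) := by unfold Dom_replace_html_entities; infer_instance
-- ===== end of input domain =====

set_option maxRecDepth 8192


-- B replaces A's per-character loop with four chained str.replace calls ('&' first), then truncates: idiomatic, same cost.

-- ===== PORT A =====
def replace_html_entities (string : String) : String :=
  let html_entities : PySem.Dict Int String :=
    PySem.Dict.ofList [(34, "&quot;"), (38, "&amp;"), (60, "&lt;"), (62, "&gt;")]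
  let result : List Char :=
    string.toList.foldl (fun result char =>
      result ++
        (match html_entities.get? (char.toNat : Int) with
         | some ent => ent.toList
         | none => [char])) []
  String.ofList (PySem.Chars.slice result none (some 2000))

-- ===== PORT B =====
def replace_html_entities_alt (string : String) : String :=
  let result :=
    PySem.Str.replace
      (PySem.Str.replace
        (PySem.Str.replace
          (PySem.Str.replace string "&" "&amp;")
          "\"" "&quot;")
        "<" "&lt;")
      ">" "&gt;"
  PySem.Str.slice result none (some 2000)

-- ===== PRECONDITION & SPEC =====
def Spec_replace_html_entities (string : String) (out : String) : Prop := out = replace_html_entities_alt string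
instance (string : String) (out : String) : Decidable (Spec_replace_html_entities string out) := by unfold Spec_replace_html_entities; infer_instance

-- ===== CLAIM (what is proved, stated in full; the proofs are below) =====
def Claim_equal_replace_html_entities : Prop := ∀ (string : String), Dom_replace_html_entities string → Spec_replace_html_entities string (replace_html_entities string)

-- ===== LEMMAS AND PROOFS =====

-- Chars.replace with a single-character pattern is a flatMap.
theorem replace_go_single (o : Char) (new : List Char) :
    ∀ (fuel : Nat) (l acc : List Char), l.length ≤ fuel →
      PySem.Chars.replace.go [o] new fuel l acc
        = acc.reverse ++ l.flatMap (fun c => if c = o then new else [c]) := by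
  intro fuel
  induction fuel with
  | zero =>
    intro l acc h
    have : l = [] := List.length_eq_zero_iff.mp (Nat.le_zero.mp h)
    subst this
    simp [PySem.Chars.replace.go]
  | succ n ih =>
    intro l acc h
    cases l with
    | nil => simp [PySem.Chars.replace.go]
    | cons c t =>
      by_cases hc : c = o
      · subst hc
        have hpre : List.isPrefixOf [c] (c :: t) = true := by
          simp [List.isPrefixOf]
        rw [PySem.Chars.replace.go, if_pos hpre]
        have ht : t.length ≤ n := by simpa using h
        have hdrop : List.drop [c].length (c :: t) = t := rfl
        rw [hdrop, ih _ _ ht]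
        simp
      · have hpre : List.isPrefixOf [o] (c :: t) = false := by
          simp [List.isPrefixOf]
          exact fun e => absurd e.symm hc
        rw [PySem.Chars.replace.go, if_neg (by simp [hpre])]
        have ht : t.length ≤ n := Nat.le_of_succ_le_succ h
        rw [ih _ _ ht]
        simp [hc]

theorem replace_single (o : Char) (new s : List Char) :
    PySem.Chars.replace s [o] new = s.flatMap (fun c => if c = o then new else [c]) := by
  rw [PySem.Chars.replace]
  simp only [List.isEmpty_cons, if_false, Bool.false_eq_true]
  exact (replace_go_single o new s.length s [] le_rfl).trans (by simp)

-- the combined per-character expansion both programs compute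
def pvExpand (c : Char) : List Char :=
  if c = '&' then "&amp;".toList
  else if c = '"' then "&quot;".toList
  else if c = '<' then "&lt;".toList
  else if c = '>' then "&gt;".toList
  else [c]

theorem chain_eq_flatMap (s : List Char) :
    PySem.Chars.replace
      (PySem.Chars.replace
        (PySem.Chars.replace
          (PySem.Chars.replace s ['&'] "&amp;".toList)
          ['"'] "&quot;".toList)
        ['<'] "&lt;".toList)
      ['>'] "&gt;".toList
    = s.flatMap pvExpand := by
  simp only [replace_single, List.flatMap_assoc]
  apply List.flatMap_congr
  intro c _
  by_cases h1 : c = '&'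
  · subst h1; rfl
  by_cases h2 : c = '"'
  · subst h2; rfl
  by_cases h3 : c = '<'
  · subst h3; rfl
  by_cases h4 : c = '>'
  · subst h4; rfl
  simp [pvExpand, h1, h2, h3, h4]

theorem lookup_eq_expand (c : Char) :
    (match (PySem.Dict.ofList (κ := Int) (ν := String)
        [(34, "&quot;"), (38, "&amp;"), (60, "&lt;"), (62, "&gt;")]).get? (c.toNat : Int) with
     | some ent => ent.toList
     | none => [c]) = pvExpand c := by
  by_cases h1 : c = '&'
  · subst h1; rfl
  by_cases h2 : c = '"'
  · subst h2; rfl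
  by_cases h3 : c = '<'
  · subst h3; rfl
  by_cases h4 : c = '>'
  · subst h4; rfl
  have n34 : ¬ ((c.toNat : Int) = 34) := by
    intro h; apply h2; have hn : c.toNat = 34 := by exact_mod_cast h
    exact Char.ext (UInt32.toNat_inj.mp hn)
  have n38 : ¬ ((c.toNat : Int) = 38) := by
    intro h; apply h1; have hn : c.toNat = 38 := by exact_mod_cast h
    exact Char.ext (UInt32.toNat_inj.mp hn)
  have n60 : ¬ ((c.toNat : Int) = 60) := by
    intro h; apply h3; have hn : c.toNat = 60 := by exact_mod_cast h
    exact Char.ext (UInt32.toNat_inj.mp hn)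
  have n62 : ¬ ((c.toNat : Int) = 62) := by
    intro h; apply h4; have hn : c.toNat = 62 := by exact_mod_cast h
    exact Char.ext (UInt32.toNat_inj.mp hn)
  have hd : (PySem.Dict.ofList (κ := Int) (ν := String)
      [(34, "&quot;"), (38, "&amp;"), (60, "&lt;"), (62, "&gt;")])
      = PySem.Dict.mk [(34, "&quot;"), (38, "&amp;"), (60, "&lt;"), (62, "&gt;")] := rfl
  rw [hd]
  have b34 : ((34 : Int) == (c.toNat : Int)) = false := beq_eq_false_iff_ne.mpr (fun h => n34 h.symm)
  have b38 : ((38 : Int) == (c.toNat : Int)) = false := beq_eq_false_iff_ne.mpr (fun h => n38 h.symm)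
  have b60 : ((60 : Int) == (c.toNat : Int)) = false := beq_eq_false_iff_ne.mpr (fun h => n60 h.symm)
  have b62 : ((62 : Int) == (c.toNat : Int)) = false := beq_eq_false_iff_ne.mpr (fun h => n62 h.symm)
  simp [PySem.Dict.get?, List.find?, pvExpand, h1, h2, h3, h4, b34, b38, b60, b62]

-- ===== VERDICT (by name: the statement is the Claim_ definition above) =====
theorem replace_html_entities_spec : Claim_equal_replace_html_entities := by
  intro s _
  unfold Spec_replace_html_entities replace_html_entities replace_html_entities_alt
  rw [← String.toList_inj]
  simp only [PySem.Str.toList_slice, PySem.Str.toList_replace, String.toList_ofList]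
  simp only [show "&".toList = ['&'] from rfl, show "\"".toList = ['"'] from rfl,
    show "<".toList = ['<'] from rfl, show ">".toList = ['>'] from rfl]
  rw [chain_eq_flatMap]
  simp only [lookup_eq_expand]
  rw [PySem.List.foldl_append_eq_flatMap]
  simp [PySem.Chars.slice]
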